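-- pv_equiv track=rewrite | github.com/dachury1/Ciencias-3-UD-CLA | libros1.py | posicion
-- ===== SOURCE A (Python) =====
-- def posicion(mal, sufijo, full_term):
--
--     for offset in range(1, len(full_term)+1)[::-1]:
--
--         marcador = True
--
--         for sufijo_index in range(0, len(sufijo)):
--
--             term_index = offset-len(sufijo)-1+sufijo_index
--
--             if term_index < 0 or sufijo[sufijo_index] == full_term[term_index]:
--
--                 pass
--
--             else:
--
--                 marcador = False
--
--         term_index = offset-len(sufijo)-1
--
--         if marcador and (term_index <= 0 or full_term[term_index-1] != mal):
--
--             return len(full_term)-offset+1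
-- ===== SOURCE B (Python) =====
-- def posicion(mal, sufijo, full_term):
--     n, m = len(full_term), len(sufijo)
--     if n == 0:
--         return None
--     # Phase 1: full occurrences of sufijo ending strictly before the last
--     # character, rightmost first, skipping those preceded by mal.
--     if m + 1 <= n:
--         s = full_term.rfind(sufijo, 0, n - 1)
--         while s > 0:
--             if full_term[s - 1] != mal:
--                 return n - m - s
--             s = full_term.rfind(sufijo, 0, s + m - 1)
--         if s == 0:
--             return n - m
--     # Phase 2: a proper suffix of sufijo matching a prefix of full_term,
--     # longest first.
--     for k in range(min(m, n) - 1, 0, -1):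
--         if full_term[:k] == sufijo[m - k:]:
--             return n - k
--     return n
-- ===== Notes on version B (the rewrite author's own statement) =====
-- stated objective: faster
-- what changed: A tries every shift right-to-left and rescans all of sufijo at each shift with an inner loop that never breaks; B replaces this with a two-phase search: str.rfind repeatedly locates the rightmost full occurrence (with a bad-character check on the preceding position), then a short descending loop over proper suffix/prefix overlaps handles the partial matches at the left edge.
import Mathlib
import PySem

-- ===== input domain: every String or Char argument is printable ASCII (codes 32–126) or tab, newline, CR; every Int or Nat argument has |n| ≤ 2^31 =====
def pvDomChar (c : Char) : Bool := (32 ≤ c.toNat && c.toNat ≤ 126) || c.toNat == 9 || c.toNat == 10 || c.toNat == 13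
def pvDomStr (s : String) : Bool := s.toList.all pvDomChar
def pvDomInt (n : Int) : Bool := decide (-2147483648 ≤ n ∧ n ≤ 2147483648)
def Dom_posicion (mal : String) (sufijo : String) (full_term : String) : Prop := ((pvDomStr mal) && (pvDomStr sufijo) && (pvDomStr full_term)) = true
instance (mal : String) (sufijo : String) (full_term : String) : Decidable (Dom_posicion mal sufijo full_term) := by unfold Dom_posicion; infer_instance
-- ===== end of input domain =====

-- B replaces A's scan of every shift with an inner full rescan by a two-phase search:
-- rightmost full occurrences found by a right-to-left substring search (rfind) with a
-- bad-character check, then the proper-suffix/prefix overlaps; same return value everywhere.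

-- ===== PORT A =====
-- inner `for sufijo_index in range(0, len(sufijo))` loop computing `marcador`
def posAInner (p t : List Char) (offset : Int) : Bool :=
  (PySem.List.pyRange 0 (p.length : Int) 1).foldl
    (fun marcador sufijo_index =>
      if offset - (p.length : Int) - 1 + sufijo_index < 0
          || PySem.List.pyGet? p sufijo_index == PySem.List.pyGet? t (offset - (p.length : Int) - 1 + sufijo_index)
      then marcador else false) true

-- outer `for offset in …` loop with its early return
def posALoop (mal : String) (p t : List Char) : List Int → Option Int
  | [] => none
  | offset :: rest =>
    if posAInner p t offset
        && (decide (offset - (p.length : Int) - 1 ≤ 0)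
            || ((PySem.List.pyGet? t (offset - (p.length : Int) - 1 - 1)).map (fun c => String.ofList [c]) != some mal))
    then some ((t.length : Int) - offset + 1)
    else posALoop mal p t rest

def posicion (mal : String) (sufijo : String) (full_term : String) : Option Int :=
  posALoop mal sufijo.toList full_term.toList
    ((PySem.List.pyRange 1 ((full_term.toList.length : Int) + 1) 1).reverse)

-- ===== PORT B =====
-- `full_term[s:s+len(sufijo)] == sufijo`, the test str.rfind performs at shift s
def sliceEq (t p : List Char) (s : Nat) : Bool := (t.drop s).take p.length == p

-- hand port of str.rfind(sufijo, 0, e): scan candidate shifts right-to-left (exact on all inputs used: 0 ≤ e ≤ len(t))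
def rfindNat (t p : List Char) : Nat → Int
  | 0 => if sliceEq t p 0 then 0 else -1
  | s + 1 => if sliceEq t p (s + 1) then ((s : Int) + 1) else rfindNat t p s

def pyRfind (t p : List Char) (e : Int) : Int :=
  if e - (p.length : Int) < 0 then -1 else rfindNat t p (e - (p.length : Int)).toNat

theorem rfindNat_le (t p : List Char) (d : Nat) : rfindNat t p d ≤ (d : Int) := by
  induction d with
  | zero => simp only [rfindNat]; split <;> omega
  | succ k ih => simp only [rfindNat]; split <;> omega

theorem pyRfind_le (t p : List Char) (e : Int) :
    pyRfind t p e ≤ e - (p.length : Int) ∨ pyRfind t p e = -1 := by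
  unfold pyRfind
  split
  · right; rfl
  · left
    have := rfindNat_le t p (e - (p.length : Int)).toNat
    omega

-- the `while s > 0: …` loop of phase 1
def bFull (mal : String) (t p : List Char) (s : Int) : Option Int :=
  if 0 < s then
    if (PySem.List.pyGet? t (s - 1)).map (fun c => String.ofList [c]) != some mal then
      some ((t.length : Int) - (p.length : Int) - s)
    else bFull mal t p (pyRfind t p (s + (p.length : Int) - 1))
  else if s == 0 then some ((t.length : Int) - (p.length : Int)) else none
termination_by s.toNat
decreasing_by
  rcases pyRfind_le t p (s + (p.length : Int) - 1) with h | h <;> omega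

-- the `for k in range(min(m, n) - 1, 0, -1)` loop of phase 2, including the final `return n`
def bPartial (t p : List Char) : Nat → Int
  | 0 => (t.length : Int)
  | k + 1 => if t.take (k + 1) == p.drop (p.length - (k + 1))
             then (t.length : Int) - ((k : Int) + 1) else bPartial t p k

def posicion_alt (mal : String) (sufijo : String) (full_term : String) : Option Int :=
  let p := sufijo.toList
  let t := full_term.toList
  if t.length = 0 then none
  else
    match (if p.length + 1 ≤ t.length then bFull mal t p (pyRfind t p ((t.length : Int) - 1)) else none) with
    | some v => some v
    | none => some (bPartial t p (min p.length t.length - 1))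

-- ===== PRECONDITION & SPEC =====
def Spec_posicion (mal : String) (sufijo : String) (full_term : String) (out : Option Int) : Prop := out = posicion_alt mal sufijo full_term
instance (mal : String) (sufijo : String) (full_term : String) (out : Option Int) : Decidable (Spec_posicion mal sufijo full_term out) := by unfold Spec_posicion; infer_instance

-- ===== CLAIM (what is proved, stated in full; the proofs are below) =====
def Claim_equal_posicion : Prop := ∀ (mal : String) (sufijo : String) (full_term : String), Dom_posicion mal sufijo full_term → Spec_posicion mal sufijo full_term (posicion mal sufijo full_term)

-- ===== LEMMAS AND PROOFS =====

-- the descending list [top, top-1, …, top-k+1]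
def descInts : Int → Nat → List Int
  | _, 0 => []
  | top, k + 1 => top :: descInts (top - 1) k

theorem descInts_append (top : Int) (a b : Nat) :
    descInts top (a + b) = descInts top a ++ descInts (top - a) b := by
  induction a generalizing top with
  | zero => simp [descInts]
  | succ k ih =>
    have : k + 1 + b = (k + b) + 1 := by omega
    rw [this]
    simp only [descInts, ih (top - 1)]
    have : top - 1 - (k : Int) = top - ((k : Int) + 1) := by omega
    rw [this]
    push_cast
    simp

theorem pyRange_reverse_eq_descInts (n : Nat) :
    (PySem.List.pyRange 1 ((n : Int) + 1) 1).reverse = descInts (n : Int) n := by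
  induction n with
  | zero => simp [PySem.List.pyRange_one_eq_nil, descInts]
  | succ k ih =>
    have h : PySem.List.pyRange 1 (((k : Int) + 1) + 1) 1
        = PySem.List.pyRange 1 ((k : Int) + 1) 1 ++ [(k : Int) + 1] :=
      PySem.List.pyRange_one_succ_right (by omega)
    push_cast
    rw [h, List.reverse_append]
    simp only [List.reverse_singleton, List.singleton_append]
    rw [ih]
    show _ = descInts ((k : Int) + 1) (k + 1)
    simp [descInts]

theorem posALoop_append (mal : String) (p t : List Char) (l1 l2 : List Int) :
    posALoop mal p t (l1 ++ l2)
      = match posALoop mal p t l1 with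
        | some v => some v
        | none => posALoop mal p t l2 := by
  induction l1 with
  | nil => simp [posALoop]
  | cons x xs ih =>
    simp only [List.cons_append, posALoop]
    split
    · rfl
    · exact ih

theorem foldl_if_all {α : Type} (c : α → Bool) (l : List α) (b : Bool) :
    l.foldl (fun acc i => if c i then acc else false) b = (b && l.all c) := by
  induction l generalizing b with
  | nil => simp
  | cons x xs ih =>
    simp only [List.foldl_cons, List.all_cons, ih]
    by_cases h : c x <;> simp [h]

theorem posAInner_eq_all (p t : List Char) (offset : Int) :
    posAInner p t offset
      = (List.range p.length).all (fun k =>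
          decide (offset - (p.length : Int) - 1 + (k : Int) < 0)
          || (PySem.List.pyGet? p (k : Int) == PySem.List.pyGet? t (offset - (p.length : Int) - 1 + (k : Int)))) := by
  unfold posAInner
  rw [PySem.List.pyRange_one, List.foldl_map]
  rw [foldl_if_all (fun k : Nat =>
      decide (offset - (p.length : Int) - 1 + (0 + (k:Int)) < 0)
      || (PySem.List.pyGet? p (0 + (k:Int)) == PySem.List.pyGet? t (offset - (p.length : Int) - 1 + (0 + (k:Int)))))]
  simp

theorem elemwise_take_drop (t p : List Char) (s' : Nat) :
    ((t.drop s').take p.length = p) ↔ (∀ k, k < p.length → p[k]? = t[s' + k]?) := by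
  constructor
  · intro h k hk
    have h1 : ((t.drop s').take p.length)[k]? = p[k]? := by rw [h]
    rw [List.getElem?_take_of_lt hk, List.getElem?_drop] at h1
    exact h1.symm
  · intro h
    apply List.ext_getElem?
    intro j
    by_cases hj : j < p.length
    · rw [List.getElem?_take_of_lt hj, List.getElem?_drop, ← h j hj]
    · rw [List.getElem?_eq_none (by simp; omega), List.getElem?_eq_none (by omega)]

theorem posAInner_pos (p t : List Char) (s : Int) (hs : 0 ≤ s) :
    posAInner p t (s + (p.length : Int) + 1) = sliceEq t p s.toNat := by
  rw [Bool.eq_iff_iff, posAInner_eq_all]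
  have e : ∀ k : Nat, s + (p.length : Int) + 1 - (p.length : Int) - 1 + (k : Int)
      = ((s.toNat + k : Nat) : Int) := by intro k; omega
  simp only [e, PySem.List.pyGet?_natCast]
  simp only [List.all_eq_true, List.mem_range, Bool.or_eq_true, decide_eq_true_eq, beq_iff_eq,
    sliceEq]
  rw [elemwise_take_drop]
  constructor
  · intro h k hk
    rcases h k hk with h1 | h1
    · omega
    · exact h1
  · intro h k hk
    right
    exact h k hk

theorem posAInner_neg (p t : List Char) (s : Int) (hs : s < 0) (hs2 : 0 ≤ s + (p.length : Int)) :
    posAInner p t (s + (p.length : Int) + 1)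
      = (t.take (s + (p.length : Int)).toNat == p.drop (p.length - (s + (p.length : Int)).toNat)) := by
  rw [Bool.eq_iff_iff, posAInner_eq_all]
  have e : ∀ k : Nat, s + (p.length : Int) + 1 - (p.length : Int) - 1 + (k : Int) = s + (k : Int) := by
    intro k; omega
  simp only [e, List.all_eq_true, List.mem_range, Bool.or_eq_true, decide_eq_true_eq, beq_iff_eq]
  have hKm : (s + (p.length : Int)).toNat ≤ p.length := by omega
  constructor
  · intro h
    apply List.ext_getElem?
    intro j
    by_cases hj : j < (s + (p.length : Int)).toNat
    · rw [List.getElem?_take_of_lt hj, List.getElem?_drop]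
      have hk : p.length - (s + (p.length : Int)).toNat + j < p.length := by omega
      rcases h _ hk with h1 | h1
      · omega
      · have e2 : s + ((p.length - (s + (p.length : Int)).toNat + j : Nat) : Int) = ((j : Nat) : Int) := by
          omega
        rw [e2] at h1
        simp only [PySem.List.pyGet?_natCast] at h1
        exact h1.symm
    · rw [List.getElem?_eq_none (by simp; omega), List.getElem?_eq_none (by simp; omega)]
  · intro h k hk
    by_cases hneg : s + (k : Int) < 0
    · exact Or.inl hneg
    · right
      have hj : k - (p.length - (s + (p.length : Int)).toNat) < (s + (p.length : Int)).toNat := by omega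
      have h1 : (t.take (s + (p.length : Int)).toNat)[k - (p.length - (s + (p.length : Int)).toNat)]?
          = (p.drop (p.length - (s + (p.length : Int)).toNat))[k - (p.length - (s + (p.length : Int)).toNat)]? := by
        rw [h]
      rw [List.getElem?_take_of_lt hj, List.getElem?_drop] at h1
      have e3 : p.length - (s + (p.length : Int)).toNat + (k - (p.length - (s + (p.length : Int)).toNat)) = k := by
        omega
      rw [e3] at h1
      have e4 : s + (k : Int) = ((k - (p.length - (s + (p.length : Int)).toNat) : Nat) : Int) := by omega
      rw [e4]
      simp only [PySem.List.pyGet?_natCast]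
      exact h1.symm

-- phase 1 ≡ A's loop over offsets n … m+2? (offsets d+m+1 down to m+1)
theorem descInts_succ (top : Int) (k : Nat) : descInts top (k + 1) = top :: descInts (top - 1) k := rfl

theorem posALoop_cons (mal : String) (p t : List Char) (offset : Int) (rest : List Int) :
    posALoop mal p t (offset :: rest)
      = if posAInner p t offset
            && (decide (offset - (p.length : Int) - 1 ≤ 0)
                || ((PySem.List.pyGet? t (offset - (p.length : Int) - 1 - 1)).map (fun c => String.ofList [c]) != some mal))
        then some ((t.length : Int) - offset + 1)
        else posALoop mal p t rest := rfl

theorem posALoop_full (mal : String) (p t : List Char) (d : Nat) :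
    posALoop mal p t (descInts ((d : Int) + (p.length : Int) + 1) (d + 1))
      = bFull mal t p (rfindNat t p d) := by
  induction d with
  | zero =>
    rw [descInts_succ, posALoop_cons, Nat.cast_zero]
    rw [posAInner_pos p t 0 le_rfl]
    have e0 : ((0 : Int)).toNat = 0 := rfl
    rw [e0]
    have eg : decide ((0 : Int) + (p.length : Int) + 1 - (p.length : Int) - 1 ≤ 0) = true := by
      simp only [decide_eq_true_eq]; omega
    rw [eg, Bool.true_or, Bool.and_true]
    by_cases hsl : sliceEq t p 0 = true
    · rw [hsl, rfindNat, if_pos hsl, if_pos rfl, bFull]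
      rw [if_neg (by omega : ¬ ((0:Int) < 0))]
      rw [if_pos (by simp : ((0 : Int) == 0) = true)]
      congr 1
      omega
    · rw [rfindNat, if_neg hsl]
      rw [Bool.not_eq_true] at hsl
      rw [hsl, if_neg (by simp), bFull]
      rw [if_neg (by omega : ¬ ((0:Int) < (-1 : Int)))]
      rw [if_neg (by simp : ¬ (((-1 : Int) == 0) = true))]
      rw [descInts]
      rfl
  | succ d ih =>
    have etop : ((d + 1 : Nat) : Int) + (p.length : Int) + 1
        = ((d : Int) + 1) + (p.length : Int) + 1 := by push_cast; ring
    rw [descInts_succ, posALoop_cons, etop]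
    rw [posAInner_pos p t ((d : Int) + 1) (by omega)]
    have eK : ((d : Int) + 1).toNat = d + 1 := by omega
    rw [eK]
    have eg : decide ((d : Int) + 1 + (p.length : Int) + 1 - (p.length : Int) - 1 ≤ 0) = false := by
      simp only [decide_eq_false_iff_not]; omega
    rw [eg, Bool.false_or]
    have eb : (d : Int) + 1 + (p.length : Int) + 1 - (p.length : Int) - 1 - 1 = (d : Int) + 1 - 1 := by
      ring
    rw [eb]
    have etail : descInts ((d : Int) + 1 + (p.length : Int) + 1 - 1) (d + 1)
        = descInts ((d : Int) + (p.length : Int) + 1) (d + 1) := by congr 1; ring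
    rw [etail]
    by_cases hsl : sliceEq t p (d + 1) = true
    · have er : rfindNat t p (d + 1) = (d : Int) + 1 := by simp [rfindNat, hsl]
      rw [hsl, Bool.true_and, er, bFull]
      rw [if_pos (by omega : (0:Int) < (d : Int) + 1)]
      by_cases hb : ((PySem.List.pyGet? t ((d : Int) + 1 - 1)).map (fun c => String.ofList [c]) != some mal) = true
      · rw [if_pos hb, if_pos hb]
        congr 1
        omega
      · rw [if_neg hb, if_neg hb]
        have epr : pyRfind t p ((d : Int) + 1 + (p.length : Int) - 1) = rfindNat t p d := by
          unfold pyRfind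
          rw [if_neg (by omega)]
          congr 1
          omega
        rw [epr]
        exact ih
    · have er : rfindNat t p (d + 1) = rfindNat t p d := by simp [rfindNat, hsl]
      rw [Bool.not_eq_true] at hsl
      rw [hsl, Bool.false_and, er, if_neg (by simp)]
      exact ih

-- phase 2 ≡ A's loop over offsets k0+1 … 1
theorem posALoop_partial (mal : String) (p t : List Char) (k0 : Nat)
    (hk : k0 + 1 ≤ p.length) :
    posALoop mal p t (descInts ((k0 : Int) + 1) (k0 + 1)) = some (bPartial t p k0) := by
  induction k0 with
  | zero =>
    rw [descInts_succ, posALoop_cons, Nat.cast_zero]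
    have ho : ((0:Int) + 1) = (-(p.length : Int)) + (p.length : Int) + 1 := by ring
    rw [ho]
    rw [posAInner_neg p t (-(p.length : Int)) (by omega) (by omega)]
    have e1 : ((-(p.length : Int)) + (p.length : Int)).toNat = 0 := by omega
    rw [e1]
    have e2 : (t.take 0 == p.drop (p.length - 0)) = true := by simp
    rw [e2, Bool.true_and]
    have eg : decide ((-(p.length : Int)) + (p.length : Int) + 1 - (p.length : Int) - 1 ≤ 0) = true := by
      simp only [decide_eq_true_eq]; omega
    rw [eg, Bool.true_or, if_pos rfl]
    simp only [bPartial]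
    congr 1
    omega
  | succ k0 ih =>
    rw [descInts_succ, posALoop_cons]
    have ho : ((k0 + 1 : Nat) : Int) + 1
        = (((k0 + 1 : Nat) : Int) - (p.length : Int)) + (p.length : Int) + 1 := by ring
    rw [ho]
    rw [posAInner_neg p t (((k0 + 1 : Nat) : Int) - (p.length : Int)) (by omega) (by omega)]
    have e1 : ((((k0 + 1 : Nat) : Int) - (p.length : Int)) + (p.length : Int)).toNat = k0 + 1 := by
      omega
    rw [e1]
    have eg : decide ((((k0 + 1 : Nat) : Int) - (p.length : Int)) + (p.length : Int) + 1 - (p.length : Int) - 1 ≤ 0) = true := by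
      simp only [decide_eq_true_eq]; omega
    rw [eg, Bool.true_or, Bool.and_true]
    have etail : descInts ((((k0 + 1 : Nat) : Int) - (p.length : Int)) + (p.length : Int) + 1 - 1) (k0 + 1)
        = descInts ((k0 : Int) + 1) (k0 + 1) := by congr 1; push_cast; ring
    rw [etail]
    simp only [bPartial]
    by_cases hc : (t.take (k0 + 1) == p.drop (p.length - (k0 + 1))) = true
    · rw [if_pos hc, if_pos hc]
      congr 1
      omega
    · rw [if_neg hc, if_neg hc]
      exact ih (by omega)

theorem rfindNat_nil (t p : List Char) (hp : p.length = 0) (d : Nat) :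
    rfindNat t p d = (d : Int) := by
  have hp' : p = [] := List.length_eq_zero_iff.mp hp
  cases d <;> simp [rfindNat, sliceEq, hp']

theorem bFull_ne_none_of_nil_aux (mal : String) (t p : List Char) (hp : p.length = 0) (N : Nat) :
    ∀ s : Int, 0 ≤ s → s.toNat ≤ N → bFull mal t p s ≠ none := by
  induction N with
  | zero =>
    intro s hs hsN
    have : s = 0 := by omega
    subst this
    rw [bFull]
    rw [if_neg (by omega : ¬ ((0:Int) < 0)), if_pos (by simp : ((0:Int) == 0) = true)]
    simp
  | succ N ihN =>
    intro s hs hsN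
    rw [bFull]
    by_cases h0 : (0 : Int) < s
    · rw [if_pos h0]
      by_cases hb : ((PySem.List.pyGet? t (s - 1)).map (fun c => String.ofList [c]) != some mal) = true
      · rw [if_pos hb]; simp
      · rw [if_neg hb]
        have epr : pyRfind t p (s + (p.length : Int) - 1) = rfindNat t p (s - 1).toNat := by
          unfold pyRfind
          rw [if_neg (by omega)]
          congr 1
          omega
        rw [epr, rfindNat_nil t p hp]
        exact ihN _ (by omega) (by omega)
    · rw [if_neg h0]
      have : s = 0 := by omega
      subst this
      rw [if_pos (by simp : ((0:Int) == 0) = true)]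
      simp

theorem main_lemma (mal : String) (p t : List Char) :
    posALoop mal p t (descInts (t.length : Int) t.length)
      = if t.length = 0 then none
        else
          match (if p.length + 1 ≤ t.length then bFull mal t p (pyRfind t p ((t.length : Int) - 1)) else none) with
          | some v => some v
          | none => some (bPartial t p (min p.length t.length - 1)) := by
  rcases Nat.eq_zero_or_pos t.length with hn | hn
  · rw [if_pos hn, hn]
    rfl
  · rw [if_neg (by omega)]
    by_cases hm : p.length + 1 ≤ t.length
    · rw [if_pos hm]
      have epr : pyRfind t p ((t.length : Int) - 1) = rfindNat t p (t.length - p.length - 1) := by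
        unfold pyRfind
        rw [if_neg (by omega)]
        congr 1
        omega
      rw [epr]
      rcases Nat.eq_zero_or_pos p.length with hm0 | hm0
      · have el : descInts ((t.length : Int)) t.length
            = descInts (((t.length - 1 : Nat) : Int) + (p.length : Int) + 1) ((t.length - 1) + 1) := by
          congr 1 <;> omega
        rw [el, posALoop_full]
        have ed : t.length - p.length - 1 = t.length - 1 := by omega
        rw [ed]
        cases hbf : bFull mal t p (rfindNat t p (t.length - 1)) with
        | some v => rfl
        | none =>
          exfalso
          refine bFull_ne_none_of_nil_aux mal t p hm0 (rfindNat t p (t.length - 1)).toNat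
            (rfindNat t p (t.length - 1)) ?_ le_rfl hbf
          rw [rfindNat_nil t p hm0]
          omega
      · have hsplit : descInts ((t.length : Int)) t.length
            = descInts ((t.length : Int)) (t.length - p.length)
              ++ descInts ((t.length : Int) - ((t.length - p.length : Nat) : Int)) p.length := by
          rw [← descInts_append]
          congr 1
          omega
        rw [hsplit, posALoop_append]
        have e1 : descInts ((t.length : Int)) (t.length - p.length)
            = descInts (((t.length - p.length - 1 : Nat) : Int) + (p.length : Int) + 1)
                ((t.length - p.length - 1) + 1) := by
          congr 1 <;> omega
        rw [e1, posALoop_full]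
        have e2 : descInts ((t.length : Int) - ((t.length - p.length : Nat) : Int)) p.length
            = descInts (((p.length - 1 : Nat) : Int) + 1) ((p.length - 1) + 1) := by
          congr 1 <;> omega
        rw [e2, posALoop_partial mal p t (p.length - 1) (by omega)]
        have emin : min p.length t.length - 1 = p.length - 1 := by omega
        rw [emin]
    · rw [if_neg hm]
      have el : descInts ((t.length : Int)) t.length
          = descInts (((t.length - 1 : Nat) : Int) + 1) ((t.length - 1) + 1) := by
        congr 1 <;> omega
      rw [el, posALoop_partial mal p t (t.length - 1) (by omega)]
      have emin : min p.length t.length - 1 = t.length - 1 := by omega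
      rw [emin]

-- ===== VERDICT (by name: the statement is the Claim_ definition above) =====
theorem posicion_spec : Claim_equal_posicion := by
  intro mal sufijo full_term _
  unfold Spec_posicion posicion posicion_alt
  rw [pyRange_reverse_eq_descInts, main_lemma]
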